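-- pv_equiv track=rewrite | github.com/Zdolik/algoritmusok | Elavator rides/feladat3.py | min_elevator_rides
-- ===== SOURCE A (Python) =====
-- def min_elevator_rides(n, x, weights):
--
--     dp = [(n + 1, 0)] * (1 << n)
--     dp[0] = (1, 0)
--
--     for mask in range(1 << n):
--         for i in range(n):  #
--             if not (mask & (1 << i)):
--                 prev_mask = mask | (1 << i)
--                 current_rides, current_weight = dp[mask]
--                 person_weight = weights[i]
--
--                 if current_weight + person_weight <= x:
--
--                     dp[prev_mask] = min(dp[prev_mask], (current_rides, current_weight + person_weight))
--                 else:
--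
--                     dp[prev_mask] = min(dp[prev_mask], (current_rides + 1, person_weight))
--
--
--     return dp[(1 << n) - 1][0]
-- ===== SOURCE B (Python) =====
-- def min_elevator_rides(n, x, weights):
--     # Top-down memoized recursion over subsets: best(mask) is the lexicographically
--     # least (rides, last_load) over removing one person at a time, cached in a dict;
--     # only A's bottom-up push table is replaced, the recurrence's value is the same.
--     memo = {}
--
--     def best(mask):
--         if mask == 0:
--             return (1, 0)
--         if mask in memo:
--             return memo[mask]
--         res = (n + 1, 0)
--         for i in range(n):
--             if (mask >> i) & 1:
--                 pr, pw = best(mask ^ (1 << i))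
--                 w = weights[i]
--                 if pw + w <= x:
--                     cand = (pr, pw + w)
--                 else:
--                     cand = (pr + 1, w)
--                 if cand < res:
--                     res = cand
--         memo[mask] = res
--         return res
--
--     return best((1 << n) - 1)[0]
-- ===== Notes on version B (the rewrite author's own statement) =====
-- stated objective: alternative
-- what changed: A's bottom-up DP that preallocates a 2^n array and pushes min-updates forward to successor masks is replaced by a top-down recursive function best(mask) with a dict memo, which recurses on mask with one person removed and takes the lexicographic min of the candidates itself.
-- outside the precondition, e.g. on min_elevator_rides(-1, 10, []): A raises ValueError, B raises ValueError; on min_elevator_rides(2, 10, [3]): A raises IndexError, B raises IndexError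
import Mathlib
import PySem

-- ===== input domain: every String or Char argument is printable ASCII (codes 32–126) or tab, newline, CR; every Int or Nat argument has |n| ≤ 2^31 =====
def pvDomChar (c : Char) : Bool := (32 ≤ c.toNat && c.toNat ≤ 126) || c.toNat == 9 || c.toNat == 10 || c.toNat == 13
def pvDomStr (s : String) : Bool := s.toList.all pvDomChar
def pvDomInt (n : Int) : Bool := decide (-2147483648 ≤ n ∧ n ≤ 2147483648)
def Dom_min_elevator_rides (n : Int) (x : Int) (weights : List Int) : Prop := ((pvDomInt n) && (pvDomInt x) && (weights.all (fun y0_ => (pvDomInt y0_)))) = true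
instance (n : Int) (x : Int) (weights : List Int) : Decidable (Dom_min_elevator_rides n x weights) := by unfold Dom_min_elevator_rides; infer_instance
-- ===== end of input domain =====

-- B replaces A's bottom-up DP (a preallocated 2^n table with min-updates pushed
-- to successor masks) by a top-down recursive best(mask) memoized in a dict;
-- same asymptotic cost, proved to return the same value.

-- ===== PORT A =====
-- Python tuple comparison (rides, weight): strict lexicographic order, as a Bool.
def pvLt (a b : Int × Int) : Bool := decide (a.1 < b.1 ∨ (a.1 = b.1 ∧ a.2 < b.2))

-- Python min(a, b): keeps a unless b < a.
def pmin (a b : Int × Int) : Int × Int := if pvLt b a then b else a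

-- Port of A. Masks and indices are Nats (Python ints that are provably ≥ 0 under
-- Pre_); weights[i] is exact as getD since Pre_ guarantees i < n ≤ weights.length.
def min_elevator_rides (n : Int) (x : Int) (weights : List Int) : Int :=
  let N := n.toNat
  let dp0 := (List.replicate (1 <<< N) ((n + 1, 0) : Int × Int)).set 0 (1, 0)
  let dp := (List.range (1 <<< N)).foldl (fun dp mask =>
    (List.range N).foldl (fun dp i =>
      if mask &&& (1 <<< i) = 0 then
        let prev_mask := mask ||| (1 <<< i)
        let cur := dp.getD mask (0, 0)
        let pw := weights.getD i 0
        dp.set prev_mask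
          (if cur.2 + pw ≤ x then pmin (dp.getD prev_mask (0, 0)) (cur.1, cur.2 + pw)
           else pmin (dp.getD prev_mask (0, 0)) (cur.1 + 1, pw))
      else dp) dp) dp0
  (dp.getD (1 <<< N - 1) (0, 0)).1

-- ===== PORT B =====
-- Port of B: best(mask) with a dict memo. The recursion is made structural with a
-- fuel counter (fuel only makes the recursion total: every recursive call strictly
-- decreases the mask and the entry point passes fuel 1 <<< n.toNat > initial mask,
-- so the fuel-0 branch is never reached); the inner for-loop is a foldl threading
-- (res, memo), since the Python recursion updates the memo as it runs.
def pvBestGo (n x : Int) (weights : List Int) :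
    Nat → Nat → PySem.Dict Nat (Int × Int) → (Int × Int) × PySem.Dict Nat (Int × Int)
  | 0, _, memo => ((1, 0), memo)
  | fuel+1, mask, memo =>
    if mask = 0 then ((1, 0), memo)
    else
      match memo.get? mask with
      | some v => (v, memo)
      | none =>
        let r := (List.range n.toNat).foldl (fun acc i =>
          if (mask >>> i) &&& 1 = 1 then
            let pm := pvBestGo n x weights fuel (mask ^^^ (1 <<< i)) acc.2
            let w := weights.getD i 0
            let cand := if pm.1.2 + w ≤ x then (pm.1.1, pm.1.2 + w) else (pm.1.1 + 1, w)
            ((if pvLt cand acc.1 then cand else acc.1), pm.2)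
          else acc) ((n + 1, 0), memo)
        (r.1, r.2.insert mask r.1)

def min_elevator_rides_alt (n : Int) (x : Int) (weights : List Int) : Int :=
  (pvBestGo n x weights (1 <<< n.toNat) (1 <<< n.toNat - 1) PySem.Dict.empty).1.1

-- ===== PRECONDITION & SPEC =====
-- Pre_ excludes exactly the inputs where Python A raises: n < 0 (1 << n is a
-- ValueError) and n > len(weights) (weights[i] is an IndexError).
def Pre_min_elevator_rides (n : Int) (x : Int) (weights : List Int) : Prop :=
  0 ≤ n ∧ n ≤ (weights.length : Int)

instance (n : Int) (x : Int) (weights : List Int) : Decidable (Pre_min_elevator_rides n x weights) := by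
  unfold Pre_min_elevator_rides; infer_instance

def pvWitness_min_elevator_rides : Int × Int × List Int := (3, 10, [4, 8, 6])

def Spec_min_elevator_rides (n : Int) (x : Int) (weights : List Int) (out : Int) : Prop := out = min_elevator_rides_alt n x weights
instance (n : Int) (x : Int) (weights : List Int) (out : Int) : Decidable (Spec_min_elevator_rides n x weights out) := by unfold Spec_min_elevator_rides; infer_instance

-- ===== CLAIM (what is proved, stated in full; the proofs are below) =====
def Claim_equal_min_elevator_rides : Prop := ∀ (n : Int) (x : Int) (weights : List Int), Dom_min_elevator_rides n x weights → Pre_min_elevator_rides n x weights → Spec_min_elevator_rides n x weights (min_elevator_rides n x weights)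

-- ===== LEMMAS AND PROOFS =====

-- clearing a set bit decreases the mask
theorem pv_xor_pow_lt {k j : Nat} (h : k.testBit j = true) : k ^^^ 2 ^ j < k := by
  refine Nat.lt_of_testBit j ?_ h ?_
  · simp [Nat.testBit_xor, h, Nat.testBit_two_pow]
  · intro t ht
    have hd : ((2:Nat) ^ j).testBit t = false := by
      simp only [Nat.testBit_two_pow]; simp; omega
    simp [Nat.testBit_xor, hd]

theorem pv_guard_testBit {mask i : Nat} (h : (mask >>> i) &&& 1 = 1) : mask.testBit i = true := by
  simp only [Nat.testBit, Nat.and_comm 1, h]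
  decide

theorem pv_bit_lt {mask i : Nat} (h : (mask >>> i) &&& 1 = 1) : mask ^^^ (1 <<< i) < mask := by
  have h1 : (1 : Nat) <<< i = 2 ^ i := by rw [Nat.shiftLeft_eq, one_mul]
  rw [h1]; exact pv_xor_pow_lt (pv_guard_testBit h)

-- the shared candidate combinator: ride with prev if the weight fits, else start a new ride
def pvCand (x : Int) (weights : List Int) (i : Nat) (p : Int × Int) : Int × Int :=
  if p.2 + weights.getD i 0 ≤ x then (p.1, p.2 + weights.getD i 0)
  else (p.1 + 1, weights.getD i 0)

theorem pmin_comm (a b : Int × Int) : pmin a b = pmin b a := by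
  rcases a with ⟨a1, a2⟩; rcases b with ⟨b1, b2⟩
  simp only [pmin, pvLt, decide_eq_true_eq]
  split_ifs with h1 h2 h2 <;> simp only [Prod.mk.injEq] at * <;> constructor <;> omega

theorem pmin_assoc (a b c : Int × Int) : pmin (pmin a b) c = pmin a (pmin b c) := by
  rcases a with ⟨a1, a2⟩; rcases b with ⟨b1, b2⟩; rcases c with ⟨c1, c2⟩
  simp only [pmin, pvLt, decide_eq_true_eq]
  split_ifs <;> simp_all only [Prod.mk.injEq, not_or, not_and, not_lt] <;> constructor <;> omega

theorem foldl_pmin_shift {α : Type} (f : α → Int × Int) (l : List α) (b c : Int × Int) :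
    l.foldl (fun acc j => pmin acc (f j)) (pmin b c) =
      pmin (l.foldl (fun acc j => pmin acc (f j)) b) c := by
  induction l generalizing b with
  | nil => rfl
  | cons a l ih =>
    simp only [List.foldl_cons]
    rw [pmin_assoc, pmin_comm c (f a), ← pmin_assoc, ih]

theorem foldl_pmin_reverse {α : Type} (f : α → Int × Int) (l : List α) (b : Int × Int) :
    l.reverse.foldl (fun acc j => pmin acc (f j)) b =
      l.foldl (fun acc j => pmin acc (f j)) b := by
  induction l generalizing b with
  | nil => rfl
  | cons a l ih =>
    simp only [List.reverse_cons, List.foldl_append, List.foldl_cons, List.foldl_nil]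
    rw [ih, ← foldl_pmin_shift]

-- positions (offset by i) of the set bits of m, in increasing order
def pvBits : Nat → Nat → List Nat
  | 0, _ => []
  | m+1, i => (if (m+1) &&& 1 = 1 then [i] else []) ++ pvBits ((m+1) >>> 1) (i+1)
  termination_by m => m
  decreasing_by simp [Nat.shiftRight_one]; omega

theorem mem_pvBits (m : Nat) : ∀ (i j : Nat), j ∈ pvBits m i ↔ i ≤ j ∧ m.testBit (j - i) := by
  induction m using Nat.strong_induction_on with
  | _ m ih =>
    intro i j
    match m with
    | 0 => simp [pvBits]
    | m+1 =>
      rw [pvBits]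
      have hlt : (m+1) >>> 1 < m + 1 := by
        rw [Nat.shiftRight_one]; exact Nat.div_lt_self (by omega) (by omega)
      simp only [List.mem_append]
      rw [ih _ hlt]
      constructor
      · rintro (hj | ⟨h1, h2⟩)
        · have : j = i := by split at hj <;> simp_all
          subst this
          refine ⟨le_refl _, ?_⟩
          split at hj
          · rename_i h; simp only [Nat.sub_self, Nat.testBit_zero]
            rw [Nat.and_one_is_mod] at h; simp [h]
          · simp at hj
        · refine ⟨by omega, ?_⟩
          have : j - i = (j - (i+1)) + 1 := by omega
          rw [this, Nat.testBit_succ, ← Nat.shiftRight_one]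
          exact h2
      · rintro ⟨h1, h2⟩
        rcases Nat.eq_or_lt_of_le h1 with rfl | h1'
        · left
          simp only [Nat.sub_self, Nat.testBit_zero] at h2
          simp only [decide_eq_true_eq] at h2
          have : (m+1) &&& 1 = 1 := by rw [Nat.and_one_is_mod]; omega
          simp [this]
        · right
          refine ⟨by omega, ?_⟩
          have : j - i = (j - (i+1)) + 1 := by omega
          rw [this, Nat.testBit_succ, ← Nat.shiftRight_one] at h2
          exact h2

theorem pairwise_pvBits (m : Nat) : ∀ (i : Nat), (pvBits m i).Pairwise (· < ·) := by
  induction m using Nat.strong_induction_on with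
  | _ m ih =>
    intro i
    match m with
    | 0 => simp [pvBits]
    | m+1 =>
      rw [pvBits]
      have hlt : (m+1) >>> 1 < m + 1 := by
        rw [Nat.shiftRight_one]; exact Nat.div_lt_self (by omega) (by omega)
      have hrest := ih _ hlt (i+1)
      have hmem : ∀ j ∈ pvBits ((m+1) >>> 1) (i+1), i < j := by
        intro j hj
        have := (mem_pvBits _ _ _).1 hj
        omega
      split
      · simpa [List.pairwise_cons] using ⟨hmem, hrest⟩
      · simpa using hrest

-- more bit facts about predecessors p = k ^^^ 2^j
theorem xor_pow_lt_xor_pow {k j j' : Nat} (hj : k.testBit j = true) (hj' : k.testBit j' = true)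
    (hlt : j < j') : k ^^^ 2 ^ j' < k ^^^ 2 ^ j := by
  refine Nat.lt_of_testBit j' ?_ ?_ ?_
  · simp [Nat.testBit_xor, hj', Nat.testBit_two_pow]
  · have hd : ((2:Nat) ^ j).testBit j' = false := by
      simp only [Nat.testBit_two_pow]; simp; omega
    simp [Nat.testBit_xor, hj', hd]
  · intro t ht
    have hd : ((2:Nat) ^ j).testBit t = false := by
      simp only [Nat.testBit_two_pow]; simp; omega
    have hd' : ((2:Nat) ^ j').testBit t = false := by
      simp only [Nat.testBit_two_pow]; simp; omega
    simp [Nat.testBit_xor, hd, hd']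

theorem xor_pow_inj {k j j' : Nat} (h : k ^^^ 2 ^ j = k ^^^ 2 ^ j') : j = j' := by
  have h2 : (2:Nat) ^ j = 2 ^ j' := by
    have := congrArg (fun t => k ^^^ t) h
    simpa [← Nat.xor_assoc] using this
  exact Nat.pow_right_injective (by omega) h2

theorem or_xor_pow {m i : Nat} (h : m.testBit i = false) : (m ||| 2 ^ i) ^^^ 2 ^ i = m := by
  apply Nat.eq_of_testBit_eq
  intro t
  simp only [Nat.testBit_xor, Nat.testBit_or, Nat.testBit_two_pow]
  by_cases ht : i = t
  · subst ht; simp [h]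
  · simp [ht]

theorem xor_pow_or {k j : Nat} (h : k.testBit j = true) : (k ^^^ 2 ^ j) ||| 2 ^ j = k := by
  apply Nat.eq_of_testBit_eq
  intro t
  simp only [Nat.testBit_xor, Nat.testBit_or, Nat.testBit_two_pow]
  by_cases ht : j = t
  · subst ht; simp [h]
  · simp [ht]

-- the least-fixpoint table of the shared recurrence, one mask appended per step
def pvBuild (n x : Int) (weights : List Int) : Nat → List (Int × Int)
  | 0 => [(1, 0)]
  | t+1 => pvBuild n x weights t ++
      [(pvBits (t+1) 0).foldl
        (fun b j => pmin b (pvCand x weights j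
          ((pvBuild n x weights t).getD ((t+1) ^^^ 2 ^ j) (0, 0)))) (n + 1, 0)]

theorem length_pvBuild (n x : Int) (weights : List Int) (t : Nat) :
    (pvBuild n x weights t).length = t + 1 := by
  induction t with
  | zero => rfl
  | succ t ih => simp [pvBuild, ih]

theorem pvBuild_getD_stable (n x : Int) (weights : List Int) {t t' k : Nat}
    (h1 : k ≤ t) (h2 : t ≤ t') :
    (pvBuild n x weights t').getD k (0, 0) = (pvBuild n x weights t).getD k (0, 0) := by
  induction t' with
  | zero =>
    have ht0 : t = 0 := by omega
    subst ht0; rfl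
  | succ t' ih =>
    rcases Nat.eq_or_lt_of_le h2 with rfl | h2'
    · rfl
    · rw [pvBuild]
      rw [List.getD_eq_getElem?_getD, List.getElem?_append_left
        (by rw [length_pvBuild]; omega), ← List.getD_eq_getElem?_getD]
      exact ih (by omega)

-- the final table value at mask k
def pvT (n x : Int) (weights : List Int) (k : Nat) : Int × Int :=
  (pvBuild n x weights k).getD k (0, 0)

theorem pvT_zero (n x : Int) (weights : List Int) : pvT n x weights 0 = (1, 0) := rfl

theorem pvT_succ (n x : Int) (weights : List Int) (t : Nat) :
    pvT n x weights (t+1) =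
      (pvBits (t+1) 0).foldl
        (fun b j => pmin b (pvCand x weights j (pvT n x weights ((t+1) ^^^ 2 ^ j)))) (n + 1, 0) := by
  unfold pvT
  rw [pvBuild, List.getD_eq_getElem?_getD, List.getElem?_append_right
      (by simp [length_pvBuild])]
  simp only [length_pvBuild, Nat.sub_self, List.getElem?_cons_zero, Option.getD_some]
  apply PySem.List.foldl_congr_mem
  intro b j hj
  have hbit : (t+1).testBit j = true := by
    have := (mem_pvBits _ _ _).1 hj; simpa using this.2
  have hlt : (t+1) ^^^ 2 ^ j < t + 1 := pv_xor_pow_lt hbit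
  show _ = pmin b (pvCand x weights j
    ((pvBuild n x weights ((t+1) ^^^ 2 ^ j)).getD ((t+1) ^^^ 2 ^ j) (0, 0)))
  rw [pvBuild_getD_stable n x weights (le_refl _) (by omega : (t+1) ^^^ 2 ^ j ≤ t)]

def pvInit (n : Int) (k : Nat) : Int × Int := if k = 0 then (1, 0) else (n + 1, 0)

-- bits j of k whose predecessor k ^^^ 2^j has already been merged after
-- processing all masks < m and, within mask m, inner indices i < t
def pvFilt (k m t : Nat) : List Nat :=
  (pvBits k 0).filter (fun j => decide (k ^^^ 2 ^ j < m ∨ (k ^^^ 2 ^ j = m ∧ j < t)))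

def pvFold (n x : Int) (weights : List Int) (k m t : Nat) : Int × Int :=
  (pvFilt k m t).reverse.foldl
    (fun b j => pmin b (pvCand x weights j (pvT n x weights (k ^^^ 2 ^ j)))) (pvInit n k)

-- A's inner-loop body
def pvInner (x : Int) (weights : List Int) (mask : Nat) (dp : List (Int × Int)) (i : Nat) :
    List (Int × Int) :=
  if mask &&& (1 <<< i) = 0 then
    let prev_mask := mask ||| (1 <<< i)
    let cur := dp.getD mask (0, 0)
    let pw := weights.getD i 0
    dp.set prev_mask
      (if cur.2 + pw ≤ x then pmin (dp.getD prev_mask (0, 0)) (cur.1, cur.2 + pw)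
       else pmin (dp.getD prev_mask (0, 0)) (cur.1 + 1, pw))
  else dp

theorem pvFilt_full {k m : Nat} (hk : k ≤ m) (t : Nat) : pvFilt k m t = pvBits k 0 := by
  unfold pvFilt
  rw [List.filter_eq_self]
  intro j hj
  have hbit : k.testBit j = true := by
    have := (mem_pvBits _ _ _).1 hj; simpa using this.2
  have := pv_xor_pow_lt hbit
  simp only [decide_eq_true_eq]
  left; omega

theorem pvFold_eq_pvT (n x : Int) (weights : List Int) {k m : Nat} (hk : k ≤ m) (t : Nat) :
    pvFold n x weights k m t = pvT n x weights k := by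
  unfold pvFold
  rw [pvFilt_full hk, foldl_pmin_reverse]
  match k with
  | 0 => simp [pvBits, pvInit, pvT_zero]
  | k+1 => rw [pvT_succ]; rfl

theorem pvFilt_nohit {k m t : Nat} (h : ¬(k.testBit t = true ∧ k ^^^ 2 ^ t = m)) :
    pvFilt k m (t+1) = pvFilt k m t := by
  unfold pvFilt
  apply List.filter_congr
  intro j hj
  have hbit : k.testBit j = true := by
    have := (mem_pvBits _ _ _).1 hj; simpa using this.2
  by_cases hjt : j = t
  · subst hjt
    by_cases hm : k ^^^ 2 ^ j = m
    · exact absurd ⟨hbit, hm⟩ h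
    · simp only [decide_eq_decide]
      omega
  · simp only [decide_eq_decide]
    omega

theorem filter_eq_cons_filter {P1 P2 : Nat → Bool} {l : List Nat} {t : Nat}
    (hl : l.Pairwise (· < ·)) (ht : t ∈ l) (h2t : P2 t = true)
    (hlt : ∀ j ∈ l, j < t → P2 j = false)
    (hgt : ∀ j ∈ l, t < j → P2 j = P1 j)
    (h1 : ∀ j ∈ l, j ≤ t → P1 j = false) :
    l.filter P2 = t :: l.filter P1 := by
  induction l with
  | nil => simp at ht
  | cons a l ih =>
    rcases List.mem_cons.1 ht with rfl | htl
    · have hgt' : ∀ j ∈ l, t < j := by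
        intro j hj; exact (List.pairwise_cons.1 hl).1 j hj
      rw [List.filter_cons, List.filter_cons, h2t, h1 t List.mem_cons_self (le_refl t)]
      simp only [if_pos rfl, reduceIte]
      congr 1
      apply List.filter_congr
      intro j hj
      exact hgt j (List.mem_cons_of_mem _ hj) (hgt' j hj)
    · have hat : a < t := (List.pairwise_cons.1 hl).1 t htl
      rw [List.filter_cons, List.filter_cons, hlt a List.mem_cons_self hat,
        h1 a List.mem_cons_self (by omega)]
      simp only [Bool.false_eq_true, if_false]
      exact ih (List.pairwise_cons.1 hl).2 htl
        (fun j hj hjt => hlt j (List.mem_cons_of_mem _ hj) hjt)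
        (fun j hj hjt => hgt j (List.mem_cons_of_mem _ hj) hjt)
        (fun j hj hjt => h1 j (List.mem_cons_of_mem _ hj) hjt)

theorem pvFilt_hit {k m t : Nat} (hbt : k.testBit t = true) (heq : k ^^^ 2 ^ t = m) :
    pvFilt k m (t+1) = t :: pvFilt k m t := by
  unfold pvFilt
  apply filter_eq_cons_filter (pairwise_pvBits k 0)
  · exact (mem_pvBits _ _ _).2 ⟨Nat.zero_le _, by simpa using hbt⟩
  · rw [heq]
    simp
  · intro j hj hjt
    have hbj : k.testBit j = true := by
      have := (mem_pvBits _ _ _).1 hj; simpa using this.2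
    have hgt : m < k ^^^ 2 ^ j := heq ▸ xor_pow_lt_xor_pow hbj hbt hjt
    simp only [decide_eq_false_iff_not]
    omega
  · intro j hj hjt
    have hne : k ^^^ 2 ^ j ≠ m := fun h => by
      have := xor_pow_inj (h.trans heq.symm); omega
    simp only [decide_eq_decide]
    omega
  · intro j hj hjt
    rcases Nat.eq_or_lt_of_le hjt with rfl | hjt'
    · simp only [decide_eq_false_iff_not]
      omega
    · have hbj : k.testBit j = true := by
        have := (mem_pvBits _ _ _).1 hj; simpa using this.2
      have hgt : m < k ^^^ 2 ^ j := heq ▸ xor_pow_lt_xor_pow hbj hbt hjt'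
      simp only [decide_eq_false_iff_not]
      omega

theorem pvFold_hit (n x : Int) (weights : List Int) {k m t : Nat}
    (hbt : k.testBit t = true) (heq : k ^^^ 2 ^ t = m) :
    pvFold n x weights k m (t+1) =
      pmin (pvFold n x weights k m t) (pvCand x weights t (pvT n x weights m)) := by
  unfold pvFold
  rw [pvFilt_hit hbt heq]
  simp only [List.reverse_cons, List.foldl_append, List.foldl_cons, List.foldl_nil, heq]

theorem pvFilt_next {k m t : Nat} (hN : ∀ j, k.testBit j = true → j < t) :
    pvFilt k (m+1) 0 = pvFilt k m t := by
  unfold pvFilt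
  apply List.filter_congr
  intro j hj
  have hbit : k.testBit j = true := by
    have := (mem_pvBits _ _ _).1 hj; simpa using this.2
  have hjt := hN j hbit
  simp only [decide_eq_decide]
  omega

theorem pvFilt_zero (k : Nat) : pvFilt k 0 0 = [] := by
  unfold pvFilt
  rw [List.filter_eq_nil_iff]
  intro j hj
  simp

theorem and_two_pow_eq_zero_iff (m t : Nat) : (m &&& 2 ^ t = 0) ↔ m.testBit t = false := by
  rw [Nat.and_two_pow]
  rcases h : m.testBit t
  · simp
  · have h2 := (Nat.two_pow_pos t).ne'
    simp [h2]

theorem pvFold_nohit (n x : Int) (weights : List Int) {k m t : Nat}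
    (h : ¬(k.testBit t = true ∧ k ^^^ 2 ^ t = m)) :
    pvFold n x weights k m (t+1) = pvFold n x weights k m t := by
  unfold pvFold
  rw [pvFilt_nohit h]

theorem pvInner_set (x : Int) (weights : List Int) (m : Nat) (dp : List (Int × Int)) (t : Nat)
    (hbit : m &&& 2 ^ t = 0) :
    pvInner x weights m dp t =
      dp.set (m ||| 2 ^ t)
        (pmin (dp.getD (m ||| 2 ^ t) (0, 0)) (pvCand x weights t (dp.getD m (0, 0)))) := by
  have h1 : (1 : Nat) <<< t = 2 ^ t := by rw [Nat.shiftLeft_eq, one_mul]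
  simp only [pvInner, pvCand, h1, hbit, if_pos]
  by_cases hc : (dp.getD m (0, 0)).2 + weights.getD t 0 ≤ x
  · rw [if_pos hc, if_pos hc]
  · rw [if_neg hc, if_neg hc]

theorem pvInner_skip (x : Int) (weights : List Int) (m : Nat) (dp : List (Int × Int)) (t : Nat)
    (hbit : ¬ m &&& 2 ^ t = 0) : pvInner x weights m dp t = dp := by
  have h1 : (1 : Nat) <<< t = 2 ^ t := by rw [Nat.shiftLeft_eq, one_mul]
  simp only [pvInner, h1]
  rw [if_neg hbit]

theorem inner_inv (n x : Int) (weights : List Int) (N m : Nat) (hm : m < 2 ^ N) :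
    ∀ (t : Nat), t ≤ N → ∀ (L : List (Int × Int)), L.length = 2 ^ N →
      (∀ k, k < 2 ^ N → L.getD k (0, 0) = pvFold n x weights k m 0) →
      ((List.range t).foldl (pvInner x weights m) L).length = 2 ^ N ∧
      ∀ k, k < 2 ^ N →
        ((List.range t).foldl (pvInner x weights m) L).getD k (0, 0) =
          pvFold n x weights k m t := by
  intro t
  induction t with
  | zero => intro _ L hlen hL; exact ⟨hlen, hL⟩
  | succ t ih =>
    intro ht L hlen hL
    obtain ⟨hlen', hL'⟩ := ih (by omega) L hlen hL
    rw [List.range_succ, List.foldl_append, List.foldl_cons, List.foldl_nil]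
    by_cases hbit : m &&& 2 ^ t = 0
    · -- bit t absent from m: A pushes to k0 = m ||| 2^t
      have hbf : m.testBit t = false := (and_two_pow_eq_zero_iff m t).1 hbit
      rw [pvInner_set x weights m _ t hbit]
      have hk0 : m ||| 2 ^ t < 2 ^ N :=
        Nat.or_lt_two_pow hm (Nat.pow_lt_pow_right (by omega) (by omega))
      have htb : (m ||| 2 ^ t).testBit t = true := by
        simp [Nat.testBit_or, Nat.testBit_two_pow]
      have hxor : (m ||| 2 ^ t) ^^^ 2 ^ t = m := or_xor_pow hbf
      refine ⟨by rw [List.length_set]; exact hlen', fun k hk => ?_⟩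
      by_cases hkk : k = m ||| 2 ^ t
      · subst hkk
        rw [List.getD_eq_getElem?_getD,
          List.getElem?_set_self (by rw [hlen']; exact hk), Option.getD_some]
        rw [hL' _ hk, hL' m hm, pvFold_eq_pvT n x weights (le_refl m)]
        exact (pvFold_hit n x weights htb hxor).symm
      · rw [List.getD_eq_getElem?_getD, List.getElem?_set_ne (fun h => hkk h.symm),
          ← List.getD_eq_getElem?_getD, hL' k hk]
        rw [pvFold_nohit]
        rintro ⟨hkt, hke⟩
        apply hkk
        rw [← xor_pow_or hkt, hke]
    · -- bit t present in m: A skips, and no mask-m candidate targets any k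
      rw [pvInner_skip x weights m _ t hbit]
      have hbt : m.testBit t = true := by
        rcases h : m.testBit t
        · exact absurd ((and_two_pow_eq_zero_iff m t).2 h) hbit
        · rfl
      refine ⟨hlen', fun k hk => ?_⟩
      rw [hL' k hk, pvFold_nohit]
      rintro ⟨hkt, hke⟩
      have hf : m.testBit t = false := by
        rw [← hke, Nat.testBit_xor, hkt, Nat.testBit_two_pow]
        simp
      simp [hf] at hbt

theorem outer_inv (n x : Int) (weights : List Int) (N : Nat) :
    ∀ m, m ≤ 2 ^ N →
      (((List.range m).foldl (fun dp mask => (List.range N).foldl (pvInner x weights mask) dp)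
          ((List.replicate (2 ^ N) ((n + 1, 0) : Int × Int)).set 0 (1, 0))).length = 2 ^ N) ∧
      ∀ k, k < 2 ^ N →
        ((List.range m).foldl (fun dp mask => (List.range N).foldl (pvInner x weights mask) dp)
            ((List.replicate (2 ^ N) ((n + 1, 0) : Int × Int)).set 0 (1, 0))).getD k (0, 0) =
          pvFold n x weights k m 0 := by
  intro m
  induction m with
  | zero =>
    intro _
    refine ⟨by simp, fun k hk => ?_⟩
    unfold pvFold
    rw [pvFilt_zero]
    simp only [List.range_zero, List.reverse_nil, List.foldl_nil]
    by_cases hk0 : k = 0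
    · subst hk0
      rw [List.getD_eq_getElem?_getD,
        List.getElem?_set_self (by simpa using Nat.two_pow_pos N), Option.getD_some]
      rfl
    · rw [List.getD_eq_getElem?_getD, List.getElem?_set_ne (fun h => hk0 h.symm),
        List.getElem?_replicate, if_pos hk]
      simp [pvInit, hk0]
  | succ m ih =>
    intro hm
    obtain ⟨hlen, hL⟩ := ih (by omega)
    rw [List.range_succ, List.foldl_append, List.foldl_cons, List.foldl_nil]
    obtain ⟨hlen', hL'⟩ := inner_inv n x weights N m (by omega) N (le_refl N) _ hlen hL
    refine ⟨hlen', fun k hk => ?_⟩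
    have hN : ∀ j, k.testBit j = true → j < N := by
      intro j hj
      by_contra hc
      have hf : k.testBit j = false :=
        Nat.testBit_eq_false_of_lt
          (lt_of_lt_of_le hk (Nat.pow_le_pow_right (by omega) (by omega)))
      simp [hf] at hj
    rw [hL' k hk]
    unfold pvFold
    rw [pvFilt_next hN]

-- ===== B-side lemmas: the memoized recursion computes pvT =====

-- the set bits of mask below N, as a filter of range N, coincide with pvBits
theorem pvBits_eq_filter {N mask : Nat} (h : mask < 2 ^ N) :
    (List.range N).filter (fun j => mask.testBit j) = pvBits mask 0 := by
  have hperm : ((List.range N).filter (fun j => mask.testBit j)).Perm (pvBits mask 0) := by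
    apply (List.perm_ext_iff_of_nodup ((List.nodup_range).filter _)
      ((pairwise_pvBits mask 0).imp ne_of_lt)).2
    intro j
    rw [List.mem_filter, List.mem_range, mem_pvBits]
    constructor
    · rintro ⟨_, hb⟩
      simpa using hb
    · rintro ⟨_, hb⟩
      simp only [Nat.sub_zero] at hb
      refine ⟨?_, by simpa using hb⟩
      by_contra hc
      have hf : mask.testBit j = false :=
        Nat.testBit_eq_false_of_lt
          (lt_of_lt_of_le h (Nat.pow_le_pow_right (by omega) (by omega)))
      simp [hf] at hb
  exact List.Perm.eq_of_pairwise'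
    (((List.pairwise_lt_range).filter _).imp le_of_lt)
    ((pairwise_pvBits mask 0).imp le_of_lt) hperm

-- memo invariant: every cached value is the fixpoint value of its key
def MemoOK (n x : Int) (weights : List Int) (memo : PySem.Dict Nat (Int × Int)) : Prop :=
  ∀ k v, memo.get? k = some v → v = pvT n x weights k

theorem loop_spec (n x : Int) (weights : List Int) (fuel mask : Nat)
    (IH : ∀ m', m' < fuel → m' < 2 ^ n.toNat →
        ∀ memo, MemoOK n x weights memo →
        (pvBestGo n x weights fuel m' memo).1 = pvT n x weights m' ∧
        MemoOK n x weights (pvBestGo n x weights fuel m' memo).2)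
    (hmf : mask < fuel + 1) (hmN : mask < 2 ^ n.toNat) :
    ∀ (is : List Nat) (res : Int × Int) (memo : PySem.Dict Nat (Int × Int)),
      MemoOK n x weights memo →
      (is.foldl (fun acc i =>
          if (mask >>> i) &&& 1 = 1 then
            let pm := pvBestGo n x weights fuel (mask ^^^ (1 <<< i)) acc.2
            let w := weights.getD i 0
            let cand := if pm.1.2 + w ≤ x then (pm.1.1, pm.1.2 + w) else (pm.1.1 + 1, w)
            ((if pvLt cand acc.1 then cand else acc.1), pm.2)
          else acc) (res, memo)).1 =
        is.foldl (fun b j => if mask.testBit j then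
          pmin b (pvCand x weights j (pvT n x weights (mask ^^^ 2 ^ j))) else b) res ∧
      MemoOK n x weights
        ((is.foldl (fun acc i =>
          if (mask >>> i) &&& 1 = 1 then
            let pm := pvBestGo n x weights fuel (mask ^^^ (1 <<< i)) acc.2
            let w := weights.getD i 0
            let cand := if pm.1.2 + w ≤ x then (pm.1.1, pm.1.2 + w) else (pm.1.1 + 1, w)
            ((if pvLt cand acc.1 then cand else acc.1), pm.2)
          else acc) (res, memo)).2) := by
  intro is
  induction is with
  | nil => intro res memo hm; exact ⟨rfl, hm⟩
  | cons i rest ih =>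
    intro res memo hm
    simp only [List.foldl_cons]
    by_cases h : (mask >>> i) &&& 1 = 1
    · have hbit : mask.testBit i = true := pv_guard_testBit h
      have h1 : (1 : Nat) <<< i = 2 ^ i := by rw [Nat.shiftLeft_eq, one_mul]
      have hlt : mask ^^^ (1 <<< i) < fuel := by
        have := pv_bit_lt h; omega
      have hltN : mask ^^^ (1 <<< i) < 2 ^ n.toNat := by
        have := pv_bit_lt h; omega
      obtain ⟨hval, hmem⟩ := IH (mask ^^^ (1 <<< i)) hlt hltN memo hm
      simp only [if_pos h]
      obtain ⟨hv, hmm⟩ := ih _ _ hmem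
      refine ⟨?_, hmm⟩
      rw [hv, hbit]
      congr 1
      rw [if_pos rfl, ← h1, ← hval]
      simp only [pmin, pvCand]
    · have h0 : (mask >>> i) &&& 1 = 0 := by
        have hle : (mask >>> i) &&& 1 ≤ 1 := Nat.and_le_right
        omega
      have hbit : mask.testBit i = false := by
        simp [Nat.testBit, Nat.and_comm 1 (mask >>> i), h0]
      simp only [if_neg h]
      obtain ⟨hv, hmm⟩ := ih res memo hm
      refine ⟨?_, hmm⟩
      rw [hv, hbit]
      simp

theorem go_spec (n x : Int) (weights : List Int) :
    ∀ (fuel mask : Nat), mask < fuel → mask < 2 ^ n.toNat →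
      ∀ memo, MemoOK n x weights memo →
        (pvBestGo n x weights fuel mask memo).1 = pvT n x weights mask ∧
        MemoOK n x weights (pvBestGo n x weights fuel mask memo).2 := by
  intro fuel
  induction fuel with
  | zero => intro mask h; omega
  | succ fuel ih =>
    intro mask hmf hmN memo hm
    rw [pvBestGo]
    by_cases h0 : mask = 0
    · subst h0
      simp only [if_pos rfl]
      exact ⟨(pvT_zero n x weights).symm, hm⟩
    · simp only [if_neg h0]
      rcases hg : memo.get? mask with _ | v
      · simp only []
        obtain ⟨hv, hmm⟩ := loop_spec n x weights fuel mask ih hmf hmN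
          (List.range n.toNat) (n + 1, 0) memo hm
        have hres := hv
        rw [PySem.List.foldl_if_eq_foldl_filter, pvBits_eq_filter hmN] at hres
        obtain ⟨t, rfl⟩ := Nat.exists_eq_succ_of_ne_zero h0
        rw [← pvT_succ] at hres
        refine ⟨hres, ?_⟩
        intro k v hk
        rw [PySem.Dict.get?_insert] at hk
        split_ifs at hk with hkm
        · subst hkm
          rw [← Option.some.inj hk]
          exact hres
        · exact hmm k v hk
      · exact ⟨hm mask v hg, hm⟩

-- ===== VERDICT (by name: the statement is the Claim_ definition above) =====
theorem min_elevator_rides_spec : Claim_equal_min_elevator_rides := by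
  intro n x weights _ _
  unfold Spec_min_elevator_rides
  have hshift : (1 : Nat) <<< n.toNat = 2 ^ n.toNat := by rw [Nat.shiftLeft_eq, one_mul]
  have hA : min_elevator_rides n x weights =
      (((List.range (2 ^ n.toNat)).foldl
          (fun dp mask => (List.range n.toNat).foldl (pvInner x weights mask) dp)
          ((List.replicate (2 ^ n.toNat) ((n + 1, 0) : Int × Int)).set 0 (1, 0))).getD
        (2 ^ n.toNat - 1) (0, 0)).1 := by
    simp only [min_elevator_rides, hshift]
    rfl
  have hk : 2 ^ n.toNat - 1 < 2 ^ n.toNat := by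
    have := Nat.two_pow_pos n.toNat; omega
  have hempty : MemoOK n x weights PySem.Dict.empty := by
    intro k v hk
    rw [PySem.Dict.get?_empty] at hk
    exact absurd hk (by simp)
  have hB : min_elevator_rides_alt n x weights = (pvT n x weights (2 ^ n.toNat - 1)).1 := by
    simp only [min_elevator_rides_alt, hshift]
    rw [(go_spec n x weights (2 ^ n.toNat) (2 ^ n.toNat - 1) hk hk PySem.Dict.empty hempty).1]
  obtain ⟨hlen, hL⟩ := outer_inv n x weights n.toNat (2 ^ n.toNat) (le_refl _)
  rw [hA, hL _ hk, pvFold_eq_pvT n x weights (by omega), hB]
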